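-- pv_equiv track=rewrite | github.com/Theppasitlu/Python101 | HomeWorkHelp/4_loops.py | position_numbers
-- ===== SOURCE A (Python) =====
-- def position_numbers(n):
--     """
--     รับ n เก็บจำนวนเต็มบวก
--     คืน ลิสต์ posnums ขนาดอย่างน้อย 2 ช่องที่เก็บ position numbers
--         ตั้งแต่ตัวแรกไปเรื่อย ๆ โดย posnums[-2] ≤ n < posnums[-1]
--     เช่น position_numbers(1) คืน [1, 2]
--         position_numbers(2) คืน [1, 2, 5]
--         position_numbers(3) คืน [1, 2, 5]
--     """
--     NLists = [1]
--     Number = 1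
--     Count = 0
--     First = 1
--     Second = 3
--
--     while Number <= n:
--         if Count%2 == 0:
--             # Number += 1 + Count//2
--             Number += First
--             First += 1
--             NLists += [Number]
--         else:
--             # Number += 3 + 2*Count//2
--             Number += Second
--             Second += 2
--             NLists += [Number]
--         Count += 1
--     return NLists
-- ===== SOURCE B (Python) =====
-- def _pent(i):
--     """The position number at index i (0-based): generalized pentagonal closed form."""
--     m = i // 2 + 1
--     return m * (3 * m - 1) // 2 if i % 2 == 0 else m * (3 * m + 1) // 2
--
--
-- def position_numbers(n):
--     out = [1]
--     i = 1
--     prev = 1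
--     while prev <= n:
--         nxt = _pent(i)
--         out.append(nxt)
--         prev = nxt
--         i += 1
--     return out
-- ===== Notes on version B (the rewrite author's own statement) =====
-- stated objective: alternative
-- what changed: B computes each appended term directly from its index with the generalized-pentagonal closed form m*(3m±1)//2 instead of maintaining A's two alternating increment accumulators (First/Second) and a parity counter.
import Mathlib
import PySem

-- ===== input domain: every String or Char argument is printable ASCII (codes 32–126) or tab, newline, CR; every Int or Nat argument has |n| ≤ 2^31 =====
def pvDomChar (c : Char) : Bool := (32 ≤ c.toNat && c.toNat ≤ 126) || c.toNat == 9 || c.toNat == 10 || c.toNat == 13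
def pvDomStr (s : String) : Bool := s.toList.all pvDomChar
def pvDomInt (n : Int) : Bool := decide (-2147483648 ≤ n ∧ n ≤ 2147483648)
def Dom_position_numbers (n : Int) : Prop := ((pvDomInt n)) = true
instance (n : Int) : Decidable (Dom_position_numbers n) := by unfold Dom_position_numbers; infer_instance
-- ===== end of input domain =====

-- B replaces A's two alternating increment accumulators by the generalized-pentagonal
-- closed form computed from the index; same task, alternative algorithm (no speed claim).
-- Both loops carry a fuel counter (n.toNat + 1, enough for every run) purely as a
-- totality guard; neither Python loop ever stops for that reason.

-- ===== PORT A =====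
-- while Number <= n: alternately add/advance First (even Count) or Second (odd Count)
def pnLoopA (n : Int) : Nat → Int → Int → Int → Int → List Int → List Int
  | 0, _, _, _, _, acc => acc
  | fuel + 1, Number, Count, First, Second, acc =>
    if Number ≤ n then
      if PySem.Int.mod Count 2 = 0 then
        pnLoopA n fuel (Number + First) (Count + 1) (First + 1) Second (acc ++ [Number + First])
      else
        pnLoopA n fuel (Number + Second) (Count + 1) First (Second + 2) (acc ++ [Number + Second])
    else acc

def position_numbers (n : Int) : List Int :=
  pnLoopA n (n.toNat + 1) 1 0 1 3 [1]

-- ===== PORT B =====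
-- _pent from Source B: the position number at index i via the pentagonal closed form
def pnPent (i : Int) : Int :=
  let m := PySem.Int.floordiv i 2 + 1
  if PySem.Int.mod i 2 = 0 then PySem.Int.floordiv (m * (3 * m - 1)) 2
  else PySem.Int.floordiv (m * (3 * m + 1)) 2

-- while prev <= n: append the closed-form term at the current index
def pnLoopB (n : Int) : Nat → Int → Int → List Int → List Int
  | 0, _, _, acc => acc
  | fuel + 1, i, prev, acc =>
    if prev ≤ n then pnLoopB n fuel (i + 1) (pnPent i) (acc ++ [pnPent i]) else acc

def position_numbers_alt (n : Int) : List Int :=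
  pnLoopB n (n.toNat + 1) 1 1 [1]

-- ===== PRECONDITION & SPEC =====
def Spec_position_numbers (n : Int) (out : List Int) : Prop := out = position_numbers_alt n
instance (n : Int) (out : List Int) : Decidable (Spec_position_numbers n out) := by unfold Spec_position_numbers; infer_instance

-- ===== CLAIM (what is proved, stated in full; the proofs are below) =====
def Claim_equal_position_numbers : Prop := ∀ (n : Int), Dom_position_numbers n → Spec_position_numbers n (position_numbers n)

-- ===== LEMMAS AND PROOFS =====

theorem pnPent_step_even (j : Int) : pnPent (2 * j + 1) = pnPent (2 * j) + (j + 1) := by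
  simp only [pnPent,
    PySem.Int.floordiv_eq_ediv_of_pos (show (0:Int) < 2 by omega),
    PySem.Int.mod_eq_emod_of_pos (show (0:Int) < 2 by omega)]
  rw [show ((2 * j + 1) % 2 : Int) = 1 by omega, show ((2 * j) % 2 : Int) = 0 by omega,
      show ((2 * j + 1) / 2 : Int) = j by omega, show ((2 * j) / 2 : Int) = j by omega]
  rw [if_neg (by omega), if_pos rfl]
  have ha : (j + 1) * (3 * (j + 1) + 1) = (j + 1) * (3 * (j + 1) - 1) + 2 * (j + 1) := by ring
  omega

theorem pnPent_step_odd (j : Int) : pnPent (2 * j + 2) = pnPent (2 * j + 1) + (2 * j + 3) := by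
  simp only [pnPent,
    PySem.Int.floordiv_eq_ediv_of_pos (show (0:Int) < 2 by omega),
    PySem.Int.mod_eq_emod_of_pos (show (0:Int) < 2 by omega)]
  rw [show ((2 * j + 2) % 2 : Int) = 0 by omega, show ((2 * j + 1) % 2 : Int) = 1 by omega,
      show ((2 * j + 2) / 2 : Int) = j + 1 by omega, show ((2 * j + 1) / 2 : Int) = j by omega]
  rw [if_pos rfl, if_neg (by omega)]
  have ha : (j + 1 + 1) * (3 * (j + 1 + 1) - 1)
      = (j + 1) * (3 * (j + 1) + 1) + 2 * (2 * j + 3) := by ring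
  omega

-- Invariant: after k appended steps A's state (Number, Count, First, Second)
-- = (pnPent k, k, 1 + (k+1)/2, 3 + 2*(k/2)) matches B's state (i, prev) = (k+1, pnPent k).
theorem pnLoop_eq (fuel : Nat) : ∀ (n k : Int) (acc : List Int), 0 ≤ k →
    pnLoopA n fuel (pnPent k) k (1 + (k + 1) / 2) (3 + 2 * (k / 2)) acc
      = pnLoopB n fuel (k + 1) (pnPent k) acc := by
  induction fuel with
  | zero => intro n k acc _; rfl
  | succ fuel ih =>
    intro n k acc hk
    simp only [pnLoopA, pnLoopB]
    by_cases hle : pnPent k ≤ n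
    · rw [if_pos hle, if_pos hle,
        PySem.Int.mod_eq_emod_of_pos (show (0:Int) < 2 by omega)]
      rcases Int.even_or_odd k with ⟨j, hj⟩ | ⟨j, hj⟩
      · -- k = 2j even: the step adds First = 1 + j
        have hj' : k = 2 * j := by omega
        have hstep : pnPent (k + 1) = pnPent k + (j + 1) := by
          rw [hj']; exact pnPent_step_even j
        rw [if_pos (by omega)]
        rw [show pnPent k + (1 + (k + 1) / 2) = pnPent (k + 1) by omega,
            show (1 : Int) + (k + 1) / 2 + 1 = 1 + (k + 1 + 1) / 2 by omega,
            show (3 : Int) + 2 * (k / 2) = 3 + 2 * ((k + 1) / 2) by omega]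
        exact ih n (k + 1) (acc ++ [pnPent (k + 1)]) (by omega)
      · -- k = 2j+1 odd: the step adds Second = 3 + 2j
        have hj' : k = 2 * j + 1 := by omega
        have hstep : pnPent (k + 1) = pnPent k + (2 * j + 3) := by
          rw [hj', show (2 * j + 1 + 1 : Int) = 2 * j + 2 by ring]
          exact pnPent_step_odd j
        rw [if_neg (by omega)]
        rw [show pnPent k + (3 + 2 * (k / 2)) = pnPent (k + 1) by omega,
            show (1 : Int) + (k + 1) / 2 = 1 + (k + 1 + 1) / 2 by omega,
            show (3 : Int) + 2 * (k / 2) + 2 = 3 + 2 * ((k + 1) / 2) by omega]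
        exact ih n (k + 1) (acc ++ [pnPent (k + 1)]) (by omega)
    · rw [if_neg hle, if_neg hle]

-- ===== VERDICT (by name: the statement is the Claim_ definition above) =====
theorem position_numbers_spec : Claim_equal_position_numbers := by
  intro n _
  unfold Spec_position_numbers position_numbers position_numbers_alt
  have h := pnLoop_eq (n.toNat + 1) n 0 [1] (by omega)
  have h0 : pnPent 0 = 1 := by decide
  rw [h0] at h
  norm_num at h
  exact h
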